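-- pv_equiv track=rewrite | github.com/pypi-data/pypi-mirror-157 | packages/lxiv-ching/lxiv-ching-0.22.6.30.4.tar.gz/lxiv-ching-0.22.6.30.4/src/lxiv-ching/lxiv_ching.py | lines_and_hex_decoder
-- ===== SOURCE A (Python) =====
-- def lines_and_hex_decoder(coins):
--     origin_code = ''
--     trans_code = ''
--     changing_lines = []
--     for i, v in enumerate(coins):
--         match v:
--             case '6':
--                 origin_code += '0'
--                 trans_code += '1'
--                 changing_lines.append(i + 1)
--             case '7':
--                 origin_code += '1'
--                 trans_code += '1'
--             case '8':
--                 origin_code += '0'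
--                 trans_code += '0'
--             case '9':
--                 origin_code += '1'
--                 trans_code += '0'
--                 changing_lines.append(i + 1)
--     return origin_code, trans_code, changing_lines
-- ===== SOURCE B (Python) =====
-- def lines_and_hex_decoder(coins):
--     valid = [v for v in coins if v in ('6', '7', '8', '9')]
--     origin_code = ''.join('1' if v in ('7', '9') else '0' for v in valid)
--     trans_code = ''.join('1' if v in ('6', '7') else '0' for v in valid)
--     changing_lines = [i + 1 for i, v in enumerate(coins) if v in ('6', '9')]
--     return origin_code, trans_code, changing_lines
-- ===== Notes on version B (the rewrite author's own statement) =====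
-- stated objective: simpler
-- what changed: Replaces the single stateful loop with a per-coin match on three accumulators by three independent comprehension passes (filter the valid coins, then one map per code string, and one enumerate filter for the changing lines).
import Mathlib
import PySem

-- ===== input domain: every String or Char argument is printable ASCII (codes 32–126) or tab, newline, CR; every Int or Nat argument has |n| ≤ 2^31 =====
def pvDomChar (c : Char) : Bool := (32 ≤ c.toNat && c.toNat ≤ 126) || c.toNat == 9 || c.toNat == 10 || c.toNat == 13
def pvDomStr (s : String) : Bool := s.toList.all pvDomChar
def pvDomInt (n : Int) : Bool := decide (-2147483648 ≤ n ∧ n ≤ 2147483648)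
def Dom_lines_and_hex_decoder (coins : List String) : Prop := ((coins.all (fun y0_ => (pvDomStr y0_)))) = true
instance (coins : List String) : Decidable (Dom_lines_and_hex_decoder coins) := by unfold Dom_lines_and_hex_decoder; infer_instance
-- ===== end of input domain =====

-- B replaces A's single stateful loop (three accumulators updated by a per-coin match)
-- by three independent passes: filter-the-valid-coins + one map per code string,
-- and a filtered enumerate for the changing lines. Objective: simpler.

-- ===== PORT A =====
-- one step of A's loop body (the match on v)
def pvStepA (st : List Char × List Char × List Int) (p : Int × String) :
    List Char × List Char × List Int :=
  if p.2 = "6" then (st.1 ++ ['0'], st.2.1 ++ ['1'], st.2.2 ++ [p.1 + 1])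
  else if p.2 = "7" then (st.1 ++ ['1'], st.2.1 ++ ['1'], st.2.2)
  else if p.2 = "8" then (st.1 ++ ['0'], st.2.1 ++ ['0'], st.2.2)
  else if p.2 = "9" then (st.1 ++ ['1'], st.2.1 ++ ['0'], st.2.2 ++ [p.1 + 1])
  else st

def lines_and_hex_decoder (coins : List String) : String × String × List Int :=
  let r := (PySem.List.enumerate coins 0).foldl pvStepA ([], [], [])
  (String.mk r.1, String.mk r.2.1, r.2.2)

-- ===== PORT B =====
def pvIsValid (v : String) : Bool := v == "6" || v == "7" || v == "8" || v == "9"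

def lines_and_hex_decoder_alt (coins : List String) : String × String × List Int :=
  let valid := coins.filter pvIsValid
  (String.mk (valid.map (fun v => if v == "7" || v == "9" then '1' else '0')),
   String.mk (valid.map (fun v => if v == "6" || v == "7" then '1' else '0')),
   (PySem.List.enumerate coins 0).filterMap
     (fun p => if p.2 == "6" || p.2 == "9" then some (p.1 + 1) else none))

-- ===== PRECONDITION & SPEC =====
def Spec_lines_and_hex_decoder (coins : List String) (out : String × String × List Int) : Prop := out = lines_and_hex_decoder_alt coins
instance (coins : List String) (out : String × String × List Int) : Decidable (Spec_lines_and_hex_decoder coins out) := by unfold Spec_lines_and_hex_decoder; infer_instance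

-- ===== CLAIM (what is proved, stated in full; the proofs are below) =====
def Claim_equal_lines_and_hex_decoder : Prop := ∀ (coins : List String), Dom_lines_and_hex_decoder coins → Spec_lines_and_hex_decoder coins (lines_and_hex_decoder coins)

-- ===== LEMMAS AND PROOFS =====

lemma pv_key (l : List String) : ∀ (s : Int) (o t : List Char) (c : List Int),
    (PySem.List.enumerate l s).foldl pvStepA (o, t, c) =
      (o ++ (l.filter pvIsValid).map (fun v => if v == "7" || v == "9" then '1' else '0'),
       t ++ (l.filter pvIsValid).map (fun v => if v == "6" || v == "7" then '1' else '0'),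
       c ++ (PySem.List.enumerate l s).filterMap
         (fun p => if p.2 == "6" || p.2 == "9" then some (p.1 + 1) else none)) := by
  induction l with
  | nil => intro s o t c; simp [PySem.List.enumerate_nil]
  | cons v rest ih =>
    intro s o t c
    by_cases h6 : v = "6"
    · subst h6
      simp [PySem.List.enumerate_cons, pvStepA, ih, pvIsValid]
    · by_cases h7 : v = "7"
      · subst h7
        simp [PySem.List.enumerate_cons, pvStepA, ih, pvIsValid]
      · by_cases h8 : v = "8"
        · subst h8
          simp [PySem.List.enumerate_cons, pvStepA, ih, pvIsValid]
        · by_cases h9 : v = "9"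
          · subst h9
            simp [PySem.List.enumerate_cons, pvStepA, ih, pvIsValid]
          · have hstep : ∀ st : List Char × List Char × List Int,
                pvStepA st (s, v) = st := by
              intro st
              simp only [pvStepA]
              split <;> first | rfl | (exfalso; simp_all)
            simp [PySem.List.enumerate_cons, hstep, ih, pvIsValid, h6, h7, h8, h9]

-- ===== VERDICT (by name: the statement is the Claim_ definition above) =====
theorem lines_and_hex_decoder_spec : Claim_equal_lines_and_hex_decoder := by
  intro coins _
  unfold Spec_lines_and_hex_decoder lines_and_hex_decoder lines_and_hex_decoder_alt
  simp [pv_key]
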